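-- pv_equiv track=rewrite | github.com/qyber-black/Code-MRSNet | mrsnet/molecules.py | convert_names
-- ===== SOURCE A (Python) =====
-- NAMES = {
--   'Alanine': ['ala'],
--   'Aspartate': ['asp'],
--   'Creatine': ['Cr', 'cre'],
--   'Choline-truncated': ['Cho'],
--   'DSS': ['DSS'],
--   'GABA': ['GABA'],
--   'Glutamate': ['Glu'],
--   'Glutamine': ['Gln'],
--   'GlutaX': ['GlX'],
--   'Glutathione': ['gsh'],
--   'Glycine': ['Gly'],
--   'Water': ['H2O'],
--   'Lactate': ['Lac'],
--   'Myo-Inositol': ['MyI', 'mi', 'ins'],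
--   'N-Acetylaspartate': ['NAA'],
--   'N-Acetylaspartylglutamic': ['NAAG'],
--   'NAAG-truncated-siemens': ['NAAG-SIE'],
--   'Phosphocreatine': ['PCr', 'pch'],
--   'Scyllo-Inositol': ['scyllo'],
--   'Taurine': ['Tau']
-- }
--
-- def convert_names(molecules, shorten=False):
--   # Standardise molecule names to short or long form
--   new_names = []
--   for name in molecules:
--     name = name.lower()
--     new_name = None
--     for long_name in NAMES:
--       if long_name.lower() == name:
--         new_name = NAMES[long_name][0] if shorten else long_name
--         break
--       for short_name in NAMES[long_name]:
--         if short_name.lower() == name: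
--           new_name = NAMES[long_name][0] if shorten else long_name
--           break
--     if new_name is None:
--       raise Exception('Metabolite name "' + name + '" invalid')
--     new_names.append(new_name)
--   return new_names
-- ===== SOURCE B (Python) =====
-- NAMES = {
--   'Alanine': ['ala'],
--   'Aspartate': ['asp'],
--   'Creatine': ['Cr', 'cre'],
--   'Choline-truncated': ['Cho'],
--   'DSS': ['DSS'],
--   'GABA': ['GABA'],
--   'Glutamate': ['Glu'],
--   'Glutamine': ['Gln'],
--   'GlutaX': ['GlX'],
--   'Glutathione': ['gsh'],
--   'Glycine': ['Gly'],
--   'Water': ['H2O'],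
--   'Lactate': ['Lac'],
--   'Myo-Inositol': ['MyI', 'mi', 'ins'],
--   'N-Acetylaspartate': ['NAA'],
--   'N-Acetylaspartylglutamic': ['NAAG'],
--   'NAAG-truncated-siemens': ['NAAG-SIE'],
--   'Phosphocreatine': ['PCr', 'pch'],
--   'Scyllo-Inositol': ['scyllo'],
--   'Taurine': ['Tau']
-- }
--
-- # One flat index built once: every lowercased long or short name -> (long_name, first_short_name)
-- LOOKUP = {}
-- for _long, _shorts in NAMES.items():
--     _entry = (_long, _shorts[0])
--     LOOKUP[_long.lower()] = _entry
--     for _s in _shorts: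
--         LOOKUP[_s.lower()] = _entry
--
-- def convert_names(molecules, shorten=False):
--   # Standardise molecule names to short or long form via a single dict lookup
--   new_names = []
--   for name in molecules:
--     key = name.lower()
--     entry = LOOKUP.get(key)
--     if entry is None:
--       raise Exception('Metabolite name "' + key + '" invalid')
--     new_names.append(entry[1] if shorten else entry[0])
--   return new_names
-- ===== Notes on version B (the rewrite author's own statement) =====
-- stated objective: simpler
-- what changed: Replaces the nested per-query scan over NAMES (outer loop over long names, inner loop over short names) with one flat dict built once that maps every lowercased long or short name to its (long, short) pair, so each molecule is resolved by a single lookup.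
import Mathlib
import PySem

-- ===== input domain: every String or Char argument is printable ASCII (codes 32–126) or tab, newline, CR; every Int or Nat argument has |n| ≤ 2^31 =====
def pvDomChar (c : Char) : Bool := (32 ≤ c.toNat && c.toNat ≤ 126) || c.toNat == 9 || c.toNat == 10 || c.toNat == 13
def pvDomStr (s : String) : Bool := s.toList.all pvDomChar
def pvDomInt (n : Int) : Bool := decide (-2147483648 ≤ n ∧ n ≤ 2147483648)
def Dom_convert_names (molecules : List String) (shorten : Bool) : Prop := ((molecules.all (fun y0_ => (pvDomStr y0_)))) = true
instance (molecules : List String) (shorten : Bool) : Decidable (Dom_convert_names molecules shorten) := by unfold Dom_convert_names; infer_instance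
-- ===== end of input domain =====

-- B replaces A's nested scan of NAMES with one flat lookup table built once; same results, raising inputs excluded by Pre_.


-- the module constant NAMES (dict of long name -> list of short names), in insertion order
def pvNAMES : List (String × List String) := [
  ("Alanine", ["ala"]),
  ("Aspartate", ["asp"]),
  ("Creatine", ["Cr", "cre"]),
  ("Choline-truncated", ["Cho"]),
  ("DSS", ["DSS"]),
  ("GABA", ["GABA"]),
  ("Glutamate", ["Glu"]),
  ("Glutamine", ["Gln"]),
  ("GlutaX", ["GlX"]),
  ("Glutathione", ["gsh"]),
  ("Glycine", ["Gly"]),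
  ("Water", ["H2O"]),
  ("Lactate", ["Lac"]),
  ("Myo-Inositol", ["MyI", "mi", "ins"]),
  ("N-Acetylaspartate", ["NAA"]),
  ("N-Acetylaspartylglutamic", ["NAAG"]),
  ("NAAG-truncated-siemens", ["NAAG-SIE"]),
  ("Phosphocreatine", ["PCr", "pch"]),
  ("Scyllo-Inositol", ["scyllo"]),
  ("Taurine", ["Tau"])
]

-- ===== PORT A =====
-- inner 'for short_name in NAMES[long_name]' loop: scan until the first lowercase match (break)
def pvInnerScan (name : String) : List String → Bool
  | [] => false
  | s :: rest => if PySem.Str.lower s == name then true else pvInnerScan name rest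

-- NAMES[long_name][0]: every list in the literal NAMES is non-empty, so headD never takes the default
def pvFirstShort (shorts : List String) : String := shorts.headD ""

-- outer 'for long_name in NAMES' loop with accumulator new_name; a long-name match breaks out,
-- a short-name match sets new_name and continues with the next long_name (A's inner break only)
def pvOuterLoop (name : String) (shorten : Bool) (acc : Option String) : List (String × List String) → Option String
  | [] => acc
  | (ln, shorts) :: rest =>
    if PySem.Str.lower ln == name then
      some (if shorten then pvFirstShort shorts else ln)
    else
      pvOuterLoop name shorten
        (if pvInnerScan name shorts then some (if shorten then pvFirstShort shorts else ln) else acc)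
        rest

def convert_names (molecules : List String) (shorten : Bool) : List String :=
  molecules.foldl (fun new_names name =>
    new_names ++ [match pvOuterLoop (PySem.Str.lower name) shorten none pvNAMES with
      | some new_name => new_name
      | none => ""]   -- Python raises Exception here; excluded by Pre_convert_names
    ) []

-- ===== PORT B =====
-- LOOKUP: every lowercased long or short name -> (long_name, shorts[0]), built once from NAMES
def pvLOOKUP : PySem.Dict String (String × String) :=
  pvNAMES.foldl (fun d p =>
    let entry := (p.1, p.2.headD "")
    p.2.foldl (fun d s => PySem.Dict.insert d (PySem.Str.lower s) entry)
      (PySem.Dict.insert d (PySem.Str.lower p.1) entry)) (PySem.Dict.empty)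

def convert_names_alt (molecules : List String) (shorten : Bool) : List String :=
  molecules.foldl (fun new_names name =>
    new_names ++ [match PySem.Dict.get? pvLOOKUP (PySem.Str.lower name) with
      | some entry => if shorten then entry.2 else entry.1
      | none => ""]   -- Python raises Exception here; excluded by Pre_convert_names
    ) []

-- ===== PRECONDITION & SPEC =====
-- the lowercased valid keys: every long name and every short name of NAMES, lowercased
def pvKeys : List String := [
  "alanine", "ala", "aspartate", "asp", "creatine", "cr", "cre",
  "choline-truncated", "cho", "dss", "gaba", "glutamate", "glu",
  "glutamine", "gln", "glutax", "glx", "glutathione", "gsh",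
  "glycine", "gly", "water", "h2o", "lactate", "lac",
  "myo-inositol", "myi", "mi", "ins", "n-acetylaspartate", "naa",
  "n-acetylaspartylglutamic", "naag", "naag-truncated-siemens", "naag-sie",
  "phosphocreatine", "pcr", "pch", "scyllo-inositol", "scyllo", "taurine", "tau"]

-- Pre_ excludes exactly the inputs on which A raises Exception ('Metabolite name … invalid')
def Pre_convert_names (molecules : List String) (shorten : Bool) : Prop :=
  ∀ name ∈ molecules, PySem.Str.lower name ∈ pvKeys
instance (molecules : List String) (shorten : Bool) : Decidable (Pre_convert_names molecules shorten) := by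
  unfold Pre_convert_names; infer_instance

def pvWitness_convert_names : List String × Bool := (["NAA", "Water", "cre"], true)

def Spec_convert_names (molecules : List String) (shorten : Bool) (out : List String) : Prop := out = convert_names_alt molecules shorten
instance (molecules : List String) (shorten : Bool) (out : List String) : Decidable (Spec_convert_names molecules shorten out) := by unfold Spec_convert_names; infer_instance

-- ===== CLAIM (what is proved, stated in full; the proofs are below) =====
def Claim_equal_convert_names : Prop := ∀ (molecules : List String) (shorten : Bool), Dom_convert_names molecules shorten → Pre_convert_names molecules shorten → Spec_convert_names molecules shorten (convert_names molecules shorten)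

-- ===== LEMMAS AND PROOFS =====

-- on each valid lowercased key both per-name resolutions give the same string
set_option maxRecDepth 8192 in
set_option maxHeartbeats 1000000 in
lemma perKey (k : String) (hk : k ∈ pvKeys) (shorten : Bool) :
    (match pvOuterLoop k shorten none pvNAMES with
     | some v => v | none => "") =
    (match PySem.Dict.get? pvLOOKUP k with
     | some e => if shorten then e.2 else e.1 | none => "") := by
  fin_cases hk <;> cases shorten <;> decide

theorem convert_names_spec : Claim_equal_convert_names := by
  intro molecules shorten _ hpre
  unfold Spec_convert_names convert_names convert_names_alt
  rw [PySem.List.foldl_append_singleton_eq_map, PySem.List.foldl_append_singleton_eq_map]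
  · exact List.map_congr_left (fun name hn => perKey _ (hpre name hn) shorten)
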